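-- pv_equiv track=rewrite | github.com/isndotbiz/ged | gedfix/names.py | normalize_name_case
-- ===== SOURCE A (Python) =====
-- NAME_PREFIXES = {"DR", "MR", "MRS", "MS", "MISS", "REV", "FR", "SIR", "LADY", "LORD", "COUNT", "DUKE"}
--
-- NAME_SUFFIXES = {"JR", "SR", "II", "III", "IV", "V", "ESQ", "MD", "PHD", "DDS"}
--
-- def normalize_name_case(name: str) -> str:
--     """Normalize name capitalization following genealogical conventions."""
--     if not name:
--         return name
--
--     # Handle surnames in slashes (GEDCOM format)
--     if '/' in name:
--         parts = name.split('/')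
--         if len(parts) == 3:  # "Given /Surname/"
--             given = parts[0].strip()
--             surname = parts[1].strip()
--             suffix = parts[2].strip()
--
--             # Capitalize given name properly
--             given_words = []
--             for word in given.split():
--                 if word.upper() in NAME_PREFIXES:
--                     given_words.append(word.upper())
--                 else:
--                     given_words.append(capitalize_name_word(word))
--
--             # Capitalize surname properly
--             surname_words = []
--             for word in surname.split():
--                 surname_words.append(capitalize_name_word(word))
--
--             return f"{' '.join(given_words)} /{' '.join(surname_words)}/"
--
--     # Handle regular names
--     words = []
--     for word in name.split():
--         if word.upper() in NAME_PREFIXES or word.upper() in NAME_SUFFIXES: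
--             words.append(word.upper())
--         else:
--             words.append(capitalize_name_word(word))
--
--     return ' '.join(words)
--
-- def capitalize_name_word(word: str) -> str:
--     """Capitalize a single name word with special handling for prefixes."""
--     if not word:
--         return word
--
--     # Handle names with apostrophes (O'Connor, D'Angelo)
--     if "'" in word:
--         parts = word.split("'")
--         return "'".join([capitalize_name_word(part) for part in parts])
--
--     # Handle hyphenated names
--     if '-' in word:
--         parts = word.split('-')
--         return '-'.join([capitalize_name_word(part) for part in parts])
--
--     # Handle Scottish/Irish prefixes
--     if word.lower().startswith('mc'):
--         if len(word) > 2: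
--             return 'Mc' + word[2:].capitalize()
--         return word.capitalize()
--
--     if word.lower().startswith('mac'):
--         if len(word) > 3:
--             return 'Mac' + word[3:].capitalize()
--         return word.capitalize()
--
--     # Standard capitalization
--     return word.capitalize()
-- ===== SOURCE B (Python) =====
-- NAME_PREFIXES = {"DR", "MR", "MRS", "MS", "MISS", "REV", "FR", "SIR", "LADY", "LORD", "COUNT", "DUKE"}
--
-- NAME_SUFFIXES = {"JR", "SR", "II", "III", "IV", "V", "ESQ", "MD", "PHD", "DDS"}
--
--
-- def _cap_plain(tok: str) -> str:
--     """Capitalize one delimiter-free token, honouring the Mc/Mac prefix rule."""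
--     low = tok.lower()
--     if low.startswith("mc") and len(tok) > 2:
--         return "Mc" + tok[2:].capitalize()
--     if low.startswith("mac") and len(tok) > 3:
--         return "Mac" + tok[3:].capitalize()
--     return tok.capitalize()
--
--
-- def capitalize_name_word(word: str) -> str:
--     """One linear scan: split off apostrophe/hyphen delimiters, capitalize each token."""
--     pieces = []
--     token = ""
--     for ch in word:
--         if ch == "'" or ch == "-":
--             pieces.append(_cap_plain(token))
--             pieces.append(ch)
--             token = ""
--         else:
--             token += ch
--     pieces.append(_cap_plain(token))
--     return "".join(pieces)
--
--
-- def normalize_name_case(name: str) -> str: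
--     """Normalize name capitalization following genealogical conventions."""
--     if not name:
--         return name
--     if '/' in name:
--         parts = name.split('/')
--         if len(parts) == 3:  # "Given /Surname/"
--             given = ' '.join(
--                 w.upper() if w.upper() in NAME_PREFIXES else capitalize_name_word(w)
--                 for w in parts[0].strip().split())
--             surname = ' '.join(capitalize_name_word(w) for w in parts[1].strip().split())
--             return f"{given} /{surname}/"
--     return ' '.join(
--         w.upper() if w.upper() in NAME_PREFIXES or w.upper() in NAME_SUFFIXES
--         else capitalize_name_word(w)
--         for w in name.split())
-- ===== Notes on version B (the rewrite author's own statement) =====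
-- stated objective: alternative
-- what changed: capitalize_name_word's two-level recursive descent (split on apostrophes, then recursively on hyphens) is replaced by a single linear scan that cuts the word at both delimiters in one pass and capitalizes each delimiter-free token directly.
import Mathlib
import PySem

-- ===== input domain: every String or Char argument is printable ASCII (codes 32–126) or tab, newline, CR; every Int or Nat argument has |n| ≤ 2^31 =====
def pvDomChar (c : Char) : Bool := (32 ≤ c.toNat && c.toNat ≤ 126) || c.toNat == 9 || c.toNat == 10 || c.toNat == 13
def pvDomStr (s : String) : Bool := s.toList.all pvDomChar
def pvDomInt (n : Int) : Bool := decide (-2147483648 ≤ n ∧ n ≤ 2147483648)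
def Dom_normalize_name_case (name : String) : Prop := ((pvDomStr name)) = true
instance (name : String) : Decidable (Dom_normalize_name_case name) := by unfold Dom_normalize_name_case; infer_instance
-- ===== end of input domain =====

-- B replaces the recursive apostrophe-then-hyphen descent of capitalize_name_word by a single
-- linear scan that splits tokens at both delimiters in one pass (objective: alternative decomposition).

-- ===== PORT A =====

-- shared module constants (Python sets; only membership is used)
def namePrefixes : List (List Char) :=
  ["DR", "MR", "MRS", "MS", "MISS", "REV", "FR", "SIR", "LADY", "LORD", "COUNT", "DUKE"].map String.toList

def nameSuffixes : List (List Char) :=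
  ["JR", "SR", "II", "III", "IV", "V", "ESQ", "MD", "PHD", "DDS"].map String.toList

-- str.capitalize(): first char upper-cased, rest lower-cased (hand port; exact on ASCII, where
-- Python's title-case of the first character coincides with its upper-case)
def pyCapitalize (cs : List Char) : List Char :=
  match cs with
  | [] => []
  | c :: rest => PySem.Chars.upperChar c :: PySem.Chars.lower rest

-- termination helpers for capWordA (cited by decreasing_by): a part of word.split(delim) is
-- strictly shorter than the word when the delimiter occurs in the word
theorem pv_go_splitOnP (d : Char) : ∀ (fuel : Nat) (l cur : List Char) (acc : List (List Char)),
    l.length < fuel →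
    PySem.Chars.splitOn.go [d] fuel l cur acc
      = acc.reverse ++ (List.splitOnP (· == d) l).modifyHead (cur.reverse ++ ·) := by
  intro fuel
  induction fuel with
  | zero => intro l cur acc h; omega
  | succ fuel ih =>
    intro l cur acc h
    cases l with
    | nil => simp [PySem.Chars.splitOn.go, List.splitOnP_nil, List.modifyHead]
    | cons c rest =>
      rw [PySem.Chars.splitOn.go]
      by_cases hdc : d = c
      · subst hdc
        simp only [List.isPrefixOf, BEq.rfl, Bool.and_self, if_pos, List.length_cons] at *
        have hd : List.drop (([] : List Char).length + 1) (d :: rest) = rest := by simp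
        rw [hd, ih rest [] (cur.reverse :: acc) (by omega)]
        rw [List.splitOnP_cons]
        simp only [BEq.rfl, if_pos]
        cases hsp : List.splitOnP (· == d) rest with
        | nil => exact absurd hsp (List.splitOnP_ne_nil _ _)
        | cons h0 t => simp [List.modifyHead]
      · have hne : ([d].isPrefixOf (c :: rest)) = false := by
          simp [List.isPrefixOf, hdc]
        rw [hne]
        simp only [Bool.false_eq_true, if_neg, not_false_iff]
        rw [ih rest (c :: cur) acc (by simpa using h)]
        rw [List.splitOnP_cons]
        have : ((c : Char) == d) = false := by simp; exact fun e => hdc e.symm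
        rw [this]
        simp only [Bool.false_eq_true, if_neg, not_false_iff]
        cases hsp : List.splitOnP (· == d) rest with
        | nil => exact absurd hsp (List.splitOnP_ne_nil _ _)
        | cons h0 t => simp [List.modifyHead]

theorem pv_splitOn_single (cs : List Char) (d : Char) :
    PySem.Chars.splitOn cs [d] = List.splitOnP (· == d) cs := by
  rw [PySem.Chars.splitOn, pv_go_splitOnP d (cs.length + 1) cs [] [] (by omega)]
  cases hsp : List.splitOnP (· == d) cs with
  | nil => exact absurd hsp (List.splitOnP_ne_nil _ _)
  | cons h0 t => simp [List.modifyHead]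

theorem pv_isIn_single (d : Char) (cs : List Char) :
    PySem.Chars.isIn [d] cs = true ↔ d ∈ cs := by
  rw [PySem.Chars.isIn_iff_infix]; exact List.singleton_infix_iff d cs

theorem pv_splitOnP_length (p : Char → Bool) : ∀ (cs : List Char), ∀ x ∈ List.splitOnP p cs,
    x.length ≤ cs.length ∧ ((∃ c ∈ cs, p c = true) → x.length < cs.length) := by
  intro cs
  induction cs with
  | nil => intro x hx; simp [List.splitOnP_nil] at hx; simp [hx]
  | cons c rest ih =>
    intro x hx
    rw [List.splitOnP_cons] at hx
    by_cases hc : p c = true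
    · rw [if_pos hc] at hx
      rcases List.mem_cons.mp hx with rfl | hx
      · constructor <;> simp
      · have := ih x hx
        constructor
        · simp; omega
        · intro _; simp; omega
    · rw [if_neg hc] at hx
      cases hsp : List.splitOnP p rest with
      | nil => exact absurd hsp (List.splitOnP_ne_nil _ _)
      | cons h0 t =>
        rw [hsp, List.modifyHead] at hx
        rcases List.mem_cons.mp hx with rfl | hx
        · have h0m := ih h0 (by rw [hsp]; exact List.mem_cons_self)
          constructor
          · simp; omega
          · rintro ⟨e, he, hpe⟩
            have he' : e ∈ rest := by
              rcases List.mem_cons.mp he with rfl | h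
              · exact absurd hpe (by simp [hc])
              · exact h
            have := h0m.2 ⟨e, he', hpe⟩
            simp; omega
        · have := ih x (by rw [hsp]; exact List.mem_cons_of_mem _ hx)
          constructor
          · simp; omega
          · intro _
            have hne : t ≠ [] := by intro hteq; rw [hteq] at hx; simp at hx
            have : ∃ c ∈ rest, p c = true := by
              by_contra hno
              push Not at hno
              have : List.splitOnP p rest = [rest] := List.splitOnP_eq_single p rest hno
              rw [this] at hsp
              injection hsp with h1 h2
              exact hne h2.symm
            have := (ih x (by rw [hsp]; exact List.mem_cons_of_mem _ hx)).2 this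
            simp; omega

theorem pv_part_length_lt {d : Char} {w p : List Char}
    (hin : PySem.Chars.isIn [d] w = true) (hp : p ∈ PySem.Chars.splitOn w [d]) :
    p.length < w.length := by
  rw [pv_splitOn_single] at hp
  exact (pv_splitOnP_length _ w p hp).2 ⟨d, (pv_isIn_single d w).mp hin, by simp⟩

-- capitalize_name_word of A: recursion over word.split("'") / word.split('-')
def capWordA (w : List Char) : List Char :=
  if w = [] then w
  else if h1 : PySem.Chars.isIn ['\''] w = true then
    PySem.Chars.join ['\''] ((PySem.Chars.splitOn w ['\'']).attach.map (fun p => capWordA p.1))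
  else if h2 : PySem.Chars.isIn ['-'] w = true then
    PySem.Chars.join ['-'] ((PySem.Chars.splitOn w ['-']).attach.map (fun p => capWordA p.1))
  else if PySem.Chars.startswith (PySem.Chars.lower w) ['m', 'c'] then
    (if 2 < w.length then ['M', 'c'] ++ pyCapitalize (PySem.Chars.slice w (some 2) none)
     else pyCapitalize w)
  else if PySem.Chars.startswith (PySem.Chars.lower w) ['m', 'a', 'c'] then
    (if 3 < w.length then ['M', 'a', 'c'] ++ pyCapitalize (PySem.Chars.slice w (some 3) none)
     else pyCapitalize w)
  else pyCapitalize w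
termination_by w.length
decreasing_by
  · exact pv_part_length_lt h1 p.2
  · exact pv_part_length_lt h2 p.2

def regularA (cs : List Char) : List Char :=
  PySem.Chars.join [' ']
    ((PySem.Chars.split₀ cs).foldl
      (fun ws w =>
        ws ++ [if namePrefixes.contains (PySem.Chars.upper w)
                  || nameSuffixes.contains (PySem.Chars.upper w)
               then PySem.Chars.upper w else capWordA w]) [])

def normalize_name_case (name : String) : String :=
  String.ofList
    (let cs := name.toList
     if cs = [] then cs
     else if PySem.Chars.isIn ['/'] cs = true then
       let parts := PySem.Chars.splitOn cs ['/']
       if parts.length = 3 then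
         let given := PySem.Chars.strip (parts.getD 0 [])
         let surname := PySem.Chars.strip (parts.getD 1 [])
         let _suffix := PySem.Chars.strip (parts.getD 2 [])   -- computed and unused, as in A
         let givenWords := (PySem.Chars.split₀ given).foldl
           (fun ws w => ws ++ [if namePrefixes.contains (PySem.Chars.upper w)
                               then PySem.Chars.upper w else capWordA w]) []
         let surnameWords := (PySem.Chars.split₀ surname).foldl
           (fun ws w => ws ++ [capWordA w]) []
         PySem.Chars.join [' '] givenWords ++ [' ', '/'] ++ PySem.Chars.join [' '] surnameWords ++ ['/']
       else regularA cs
     else regularA cs)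

-- ===== PORT B =====

-- _cap_plain of B: capitalize one delimiter-free token (Mc/Mac rule)
def capPlain (t : List Char) : List Char :=
  let low := PySem.Chars.lower t
  if PySem.Chars.startswith low ['m', 'c'] && decide (2 < t.length) then
    ['M', 'c'] ++ pyCapitalize (PySem.Chars.slice t (some 2) none)
  else if PySem.Chars.startswith low ['m', 'a', 'c'] && decide (3 < t.length) then
    ['M', 'a', 'c'] ++ pyCapitalize (PySem.Chars.slice t (some 3) none)
  else pyCapitalize t

-- the loop body of B's one-pass scan: state = (finished pieces, current token)
def stepB (st : List (List Char) × List Char) (ch : Char) : List (List Char) × List Char :=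
  if ch == '\'' || ch == '-' then (st.1 ++ [capPlain st.2, [ch]], [])
  else (st.1, st.2 ++ [ch])

-- capitalize_name_word of B: one scan over the word, then "".join(pieces)
def capWordB (w : List Char) : List Char :=
  let st := w.foldl stepB ([], [])
  PySem.Chars.join [] (st.1 ++ [capPlain st.2])

def regularB (cs : List Char) : List Char :=
  PySem.Chars.join [' ']
    ((PySem.Chars.split₀ cs).map
      (fun w => if namePrefixes.contains (PySem.Chars.upper w)
                   || nameSuffixes.contains (PySem.Chars.upper w)
                then PySem.Chars.upper w else capWordB w))

def normalize_name_case_alt (name : String) : String :=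
  String.ofList
    (let cs := name.toList
     if cs = [] then cs
     else if PySem.Chars.isIn ['/'] cs = true then
       let parts := PySem.Chars.splitOn cs ['/']
       if parts.length = 3 then
         let given := PySem.Chars.join [' ']
           ((PySem.Chars.split₀ (PySem.Chars.strip (parts.getD 0 []))).map
             (fun w => if namePrefixes.contains (PySem.Chars.upper w)
                       then PySem.Chars.upper w else capWordB w))
         let surname := PySem.Chars.join [' ']
           ((PySem.Chars.split₀ (PySem.Chars.strip (parts.getD 1 []))).map capWordB)
         given ++ [' ', '/'] ++ surname ++ ['/']
       else regularB cs
     else regularB cs)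

-- ===== PRECONDITION & SPEC =====
def Spec_normalize_name_case (name : String) (out : String) : Prop := out = normalize_name_case_alt name
instance (name : String) (out : String) : Decidable (Spec_normalize_name_case name out) := by unfold Spec_normalize_name_case; infer_instance

-- ===== CLAIM (what is proved, stated in full; the proofs are below) =====
def Claim_equal_normalize_name_case : Prop := ∀ (name : String), Dom_normalize_name_case name → Spec_normalize_name_case name (normalize_name_case name)

-- ===== LEMMAS AND PROOFS =====

theorem pv_join_nil_flatten (l : List (List Char)) : PySem.Chars.join [] l = l.flatten := by
  simp only [PySem.Chars.join]
  induction l with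
  | nil => simp [List.intercalate]
  | cons a t ih => cases t <;> simp_all [List.intercalate]

theorem pv_shift (w : List Char) : ∀ (ps : List (List Char)) (tok : List Char),
    List.foldl stepB (ps, tok) w
      = (ps ++ (List.foldl stepB ([], tok) w).1, (List.foldl stepB ([], tok) w).2) := by
  induction w with
  | nil => intro ps tok; simp
  | cons c w ih =>
    intro ps tok
    simp only [List.foldl_cons]
    by_cases hc : (c == '\'' || c == '-') = true
    · rw [show stepB (ps, tok) c = (ps ++ [capPlain tok, [c]], []) by simp [stepB, hc],
          show stepB (([] : List (List Char)), tok) c = ([capPlain tok, [c]], []) by simp [stepB, hc]]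
      rw [ih (ps ++ [capPlain tok, [c]]) [], ih [capPlain tok, [c]] []]
      simp
    · rw [show stepB (ps, tok) c = (ps, tok ++ [c]) by simp [stepB, hc],
          show stepB (([] : List (List Char)), tok) c = ([], tok ++ [c]) by simp [stepB, hc]]
      exact ih ps (tok ++ [c])

theorem pv_nodelim (w : List Char) : ∀ (tok : List Char), (∀ c ∈ w, ¬(c = '\'' ∨ c = '-')) →
    List.foldl stepB ([], tok) w = ([], tok ++ w) := by
  induction w with
  | nil => intro tok _; simp
  | cons c w ih =>
    intro tok h
    have hc : (c == '\'' || c == '-') = false := by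
      have := h c List.mem_cons_self; simp at this ⊢; exact this
    simp only [List.foldl_cons]
    rw [show stepB (([] : List (List Char)), tok) c = ([], tok ++ [c]) by simp [stepB, hc]]
    rw [ih (tok ++ [c]) (fun e he => h e (List.mem_cons_of_mem _ he))]
    simp

theorem pv_L1 (w : List Char) (h : ∀ c ∈ w, ¬(c = '\'' ∨ c = '-')) : capWordB w = capPlain w := by
  rw [capWordB]
  simp only [pv_nodelim w [] h]
  simp

theorem pv_L2 (x y : List Char) (d : Char) (hd : d = '\'' ∨ d = '-') :
    capWordB (x ++ d :: y) = capWordB x ++ d :: capWordB y := by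
  have hdb : (d == '\'' || d == '-') = true := by rcases hd with rfl | rfl <;> simp
  rw [capWordB, capWordB, capWordB]
  simp only [List.foldl_append, List.foldl_cons]
  set st := List.foldl stepB ([], []) x with hst
  rw [show stepB st d = (st.1 ++ [capPlain st.2, [d]], []) by simp [stepB, hdb]]
  rw [pv_shift y (st.1 ++ [capPlain st.2, [d]]) []]
  simp [pv_join_nil_flatten]

theorem pv_J (d : Char) (hd : d = '\'' ∨ d = '-') : ∀ (parts : List (List Char)),
    capWordB (List.intercalate [d] parts) = PySem.Chars.join [d] (parts.map capWordB) := by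
  intro parts
  induction parts with
  | nil => simp [PySem.Chars.join, List.intercalate]; decide
  | cons p rest ih =>
    cases rest with
    | nil => simp [List.intercalate, PySem.Chars.join_singleton]
    | cons q t =>
      have hic : List.intercalate [d] (p :: q :: t) = p ++ d :: List.intercalate [d] (q :: t) := by
        simp [List.intercalate]
      rw [hic, pv_L2 _ _ d hd, ih]
      rw [show List.map capWordB (p :: q :: t) = capWordB p :: capWordB q :: List.map capWordB t from rfl,
          PySem.Chars.join_cons_cons]
      simp

theorem pv_capA_eq_capB (w : List Char) : capWordA w = capWordB w := by
  have key : ∀ n (w : List Char), w.length ≤ n → capWordA w = capWordB w := by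
    intro n
    induction n with
    | zero =>
      intro w hw
      have h0 : w = [] := List.eq_nil_of_length_eq_zero (by omega)
      subst h0
      rw [capWordA.eq_def]; simp; decide
    | succ n ih =>
      intro w hw
      by_cases h0 : w = []
      · subst h0
        rw [capWordA.eq_def]; simp; decide
      rw [capWordA.eq_def, if_neg h0]
      by_cases h1 : PySem.Chars.isIn ['\''] w = true
      · rw [dif_pos h1]
        have hparts : ∀ p ∈ PySem.Chars.splitOn w ['\''], capWordA p = capWordB p := fun p hp =>
          ih p (by have := pv_part_length_lt h1 hp; omega)
        have hmap : (PySem.Chars.splitOn w ['\'']).attach.map (fun p => capWordA p.1)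
            = (PySem.Chars.splitOn w ['\'']).map capWordB := by
          calc (PySem.Chars.splitOn w ['\'']).attach.map (fun p => capWordA p.1)
              = (PySem.Chars.splitOn w ['\'']).attach.map (fun p => capWordB p.1) :=
                List.map_congr_left (fun p _ => hparts p.1 p.2)
            _ = (PySem.Chars.splitOn w ['\'']).map capWordB := List.attach_map_val
        rw [hmap]
        have hw' : List.intercalate ['\''] (PySem.Chars.splitOn w ['\'']) = w := by
          rw [pv_splitOn_single]
          exact List.intercalate_splitOn w '\''
        conv_rhs => rw [← hw']
        rw [pv_J '\'' (Or.inl rfl)]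
      rw [dif_neg h1]
      by_cases h2 : PySem.Chars.isIn ['-'] w = true
      · rw [dif_pos h2]
        have hparts : ∀ p ∈ PySem.Chars.splitOn w ['-'], capWordA p = capWordB p := fun p hp =>
          ih p (by have := pv_part_length_lt h2 hp; omega)
        have hmap : (PySem.Chars.splitOn w ['-']).attach.map (fun p => capWordA p.1)
            = (PySem.Chars.splitOn w ['-']).map capWordB := by
          calc (PySem.Chars.splitOn w ['-']).attach.map (fun p => capWordA p.1)
              = (PySem.Chars.splitOn w ['-']).attach.map (fun p => capWordB p.1) :=
                List.map_congr_left (fun p _ => hparts p.1 p.2)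
            _ = (PySem.Chars.splitOn w ['-']).map capWordB := List.attach_map_val
        rw [hmap]
        have hw' : List.intercalate ['-'] (PySem.Chars.splitOn w ['-']) = w := by
          rw [pv_splitOn_single]
          exact List.intercalate_splitOn w '-'
        conv_rhs => rw [← hw']
        rw [pv_J '-' (Or.inr rfl)]
      rw [dif_neg h2]
      have hnd : ∀ c ∈ w, ¬(c = '\'' ∨ c = '-') := by
        intro c hc
        rintro (rfl | rfl)
        · exact h1 ((pv_isIn_single _ _).mpr hc)
        · exact h2 ((pv_isIn_single _ _).mpr hc)
      rw [pv_L1 w hnd, capPlain]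
      by_cases hmc : PySem.Chars.startswith (PySem.Chars.lower w) ['m', 'c'] = true
      · by_cases hl : 2 < w.length
        · simp [hmc, hl]
        · have hmac : PySem.Chars.startswith (PySem.Chars.lower w) ['m', 'a', 'c'] = false := by
            cases hw3 : PySem.Chars.startswith (PySem.Chars.lower w) ['m', 'a', 'c'] with
            | false => rfl
            | true =>
              exfalso
              have hlen : (3 : Nat) ≤ (PySem.Chars.lower w).length := by
                have := ((PySem.Chars.startswith_iff _ _).mp hw3).length_le
                simpa using this
              simp [PySem.Chars.lower] at hlen
              omega
          simp [hmc, hmac, hl]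
      · by_cases hmac : PySem.Chars.startswith (PySem.Chars.lower w) ['m', 'a', 'c'] = true
        · by_cases hl : 3 < w.length <;> simp [hmc, hmac, hl]
        · simp [hmc, hmac]
  exact key w.length w le_rfl

-- ===== VERDICT (by name: the statement is the Claim_ definition above) =====
theorem normalize_name_case_spec : Claim_equal_normalize_name_case := by
  intro name _
  unfold Spec_normalize_name_case normalize_name_case normalize_name_case_alt regularA regularB
  have hcap : capWordA = capWordB := funext pv_capA_eq_capB
  simp only [hcap, PySem.List.foldl_append_singleton_eq_map, List.nil_append]
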